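-- pv_equiv track=rewrite | github.com/meiruzhang2022/CE-UNet | models/two_d/TransFuse/DeiT.py | _infer_hw_from_N
-- ===== SOURCE A (Python) =====
-- import math
--
-- def _infer_hw_from_N(N):
--     # 偏向 3:4 的分解，其次退化为因子分解
--     for k in range(1, 100):
--         h, w = 3 * k, 4 * k
--         if h * w == N:
--             return (h, w)
--     h = int(round(math.sqrt(N)))
--     while N % h != 0:
--         h -= 1
--     return (h, N // h)
-- ===== SOURCE B (Python) =====
-- import math
--
-- def _infer_hw_from_N(N):
--     # closed-form 3:4 test instead of scanning k = 1..99
--     if N % 12 == 0: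
--         m = N // 12
--         k = math.isqrt(m)
--         if k * k == m and 1 <= k < 100:
--             return (3 * k, 4 * k)
--     h = int(round(math.sqrt(N)))
--     while N % h != 0:
--         h -= 1
--     return (h, N // h)
-- ===== Notes on version B (the rewrite author's own statement) =====
-- stated objective: idiomatic
-- what changed: Replaces the bounded scan over k=1..99 by a direct closed-form test (divisibility by 12 plus an integer-sqrt perfect-square check); the trial-division fallback is unchanged.
import Mathlib
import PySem

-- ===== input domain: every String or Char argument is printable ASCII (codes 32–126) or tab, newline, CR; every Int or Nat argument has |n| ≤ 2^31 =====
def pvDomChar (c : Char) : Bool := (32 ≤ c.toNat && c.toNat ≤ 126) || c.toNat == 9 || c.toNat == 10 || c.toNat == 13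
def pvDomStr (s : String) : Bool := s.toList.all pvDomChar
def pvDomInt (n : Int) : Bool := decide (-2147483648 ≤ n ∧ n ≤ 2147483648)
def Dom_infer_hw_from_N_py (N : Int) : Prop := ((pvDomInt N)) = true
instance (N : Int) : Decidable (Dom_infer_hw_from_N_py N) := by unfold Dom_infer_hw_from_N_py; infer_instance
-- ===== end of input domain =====

-- B replaces A's scan over k = 1..99 by a closed-form divisibility + integer-sqrt test
-- (objective: idiomatic); the trial-division fallback is unchanged.

-- ===== PORT A =====

-- int(round(math.sqrt(N))): exact for 0 ≤ N ≤ 2^31, since there the double sqrt's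
-- rounding error is far smaller than the distance of √N from any half-integer;
-- round(√N) = r if N ≤ r²+r else r+1, with r = ⌊√N⌋.
def pyRoundSqrt (N : Int) : Int :=
  if N ≤ Int.sqrt N * Int.sqrt N + Int.sqrt N then Int.sqrt N else Int.sqrt N + 1

-- 'while N % h != 0: h -= 1' ; the '0 < h' guard only makes the recursion total
-- (Python raises ZeroDivisionError when h reaches 0, which Pre_ excludes).
def trialDown (N h : Int) : Int × Int :=
  if 0 < h ∧ PySem.Int.mod N h ≠ 0 then trialDown N (h - 1)
  else (h, PySem.Int.floordiv N h)
termination_by h.toNat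
decreasing_by omega

-- 'for k in range(1, 100): … return (h, w)' as first-match over the range list
def loopA (N : Int) : List Int → Option (Int × Int)
  | [] => none
  | k :: ks => if (3 * k) * (4 * k) = N then some (3 * k, 4 * k) else loopA N ks

def infer_hw_from_N_py (N : Int) : Int × Int :=
  match loopA N (PySem.List.pyRange 1 100 1) with
  | some p => p
  | none => trialDown N (pyRoundSqrt N)

-- ===== PORT B =====
def infer_hw_from_N_py_alt (N : Int) : Int × Int :=
  if PySem.Int.mod N 12 = 0 then
    let m := PySem.Int.floordiv N 12
    let k := Int.sqrt m   -- math.isqrt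
    if k * k = m ∧ 1 ≤ k ∧ k < 100 then (3 * k, 4 * k)
    else trialDown N (pyRoundSqrt N)
  else trialDown N (pyRoundSqrt N)

-- ===== PRECONDITION & SPEC =====
-- Python A raises on N ≤ 0 (ValueError from math.sqrt for N < 0, ZeroDivisionError for N = 0).
def Pre_infer_hw_from_N_py (N : Int) : Prop := 1 ≤ N
instance (N : Int) : Decidable (Pre_infer_hw_from_N_py N) := by unfold Pre_infer_hw_from_N_py; infer_instance
def pvWitness_infer_hw_from_N_py : Int := 12

def Spec_infer_hw_from_N_py (N : Int) (out : Int × Int) : Prop := out = infer_hw_from_N_py_alt N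
instance (N : Int) (out : Int × Int) : Decidable (Spec_infer_hw_from_N_py N out) := by unfold Spec_infer_hw_from_N_py; infer_instance

-- ===== CLAIM (what is proved, stated in full; the proofs are below) =====
def Claim_equal_infer_hw_from_N_py : Prop := ∀ (N : Int), Dom_infer_hw_from_N_py N → Pre_infer_hw_from_N_py N → Spec_infer_hw_from_N_py N (infer_hw_from_N_py N)

-- ===== LEMMAS AND PROOFS =====

theorem loopA_eq_none (N : Int) (l : List Int) (h : ∀ k ∈ l, (3 * k) * (4 * k) ≠ N) :
    loopA N l = none := by
  induction l with
  | nil => rfl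
  | cons j ks ih =>
    simp only [loopA, if_neg (h j (List.mem_cons_self))]
    exact ih (fun k hk => h k (List.mem_cons_of_mem j hk))

theorem loopA_eq_some (N k : Int) (l : List Int) (hpos : ∀ j ∈ l, 1 ≤ j) (hk : k ∈ l)
    (he : (3 * k) * (4 * k) = N) : loopA N l = some (3 * k, 4 * k) := by
  induction l with
  | nil => exact absurd hk List.not_mem_nil
  | cons j ks ih =>
    simp only [loopA]
    by_cases hj : (3 * j) * (4 * j) = N
    · rw [if_pos hj]
      have hj1 : 1 ≤ j := hpos j List.mem_cons_self
      have hk1 : 1 ≤ k := hpos k hk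
      have h1 : j ≤ k := by nlinarith
      have h2 : k ≤ j := by nlinarith
      have : j = k := le_antisymm h1 h2
      subst this; rfl
    · rw [if_neg hj]
      rcases List.mem_cons.mp hk with h | h
      · exact absurd (h ▸ he) hj
      · exact ih (fun j hj => hpos j (List.mem_cons_of_mem _ hj)) h

theorem no_match (N : Int)
    (hc : ¬ (PySem.Int.mod N 12 = 0 ∧
      Int.sqrt (PySem.Int.floordiv N 12) * Int.sqrt (PySem.Int.floordiv N 12) = PySem.Int.floordiv N 12 ∧
      1 ≤ Int.sqrt (PySem.Int.floordiv N 12) ∧ Int.sqrt (PySem.Int.floordiv N 12) < 100)) :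
    loopA N (PySem.List.pyRange 1 100 1) = none := by
  apply loopA_eq_none
  intro j hj hje
  obtain ⟨hj1, hj2⟩ := (PySem.List.mem_pyRange_one).mp hj
  have hN : N = j * j * 12 := by nlinarith
  have h12 : PySem.Int.mod N 12 = 0 :=
    (PySem.Int.mod_eq_zero_iff_dvd N 12).mpr ⟨j * j, by linarith⟩
  have hm : PySem.Int.floordiv N 12 = j * j := by
    rw [PySem.Int.floordiv_eq_ediv_of_pos (by norm_num), hN,
      Int.mul_ediv_cancel _ (by norm_num : (12 : Int) ≠ 0)]
  have hs : Int.sqrt (PySem.Int.floordiv N 12) = j := by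
    rw [hm, Int.sqrt_eq, Int.natAbs_of_nonneg (by omega)]
  exact hc ⟨h12, by rw [hs, hm], by rw [hs]; omega, by rw [hs]; omega⟩

-- ===== VERDICT (by name: the statement is the Claim_ definition above) =====
theorem infer_hw_from_N_py_spec : Claim_equal_infer_hw_from_N_py := by
  intro N _ _
  unfold Spec_infer_hw_from_N_py
  by_cases h12 : PySem.Int.mod N 12 = 0
  · by_cases hc : Int.sqrt (PySem.Int.floordiv N 12) * Int.sqrt (PySem.Int.floordiv N 12) = PySem.Int.floordiv N 12 ∧
        1 ≤ Int.sqrt (PySem.Int.floordiv N 12) ∧ Int.sqrt (PySem.Int.floordiv N 12) < 100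
    · set k := Int.sqrt (PySem.Int.floordiv N 12) with hk
      have hNm : PySem.Int.floordiv N 12 * 12 + PySem.Int.mod N 12 = N :=
        PySem.Int.floordiv_mul_add_mod N 12
      have hN : N = k * k * 12 := by rw [hc.1]; omega
      have hmem : k ∈ PySem.List.pyRange 1 100 1 :=
        (PySem.List.mem_pyRange_one).mpr ⟨hc.2.1, hc.2.2⟩
      have hloop : loopA N (PySem.List.pyRange 1 100 1) = some (3 * k, 4 * k) :=
        loopA_eq_some N k _ (fun j hj => ((PySem.List.mem_pyRange_one).mp hj).1) hmem (by nlinarith)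
      simp only [infer_hw_from_N_py, hloop, infer_hw_from_N_py_alt, if_pos h12, ← hk,
        if_pos hc]
    · have hnone := no_match N (by tauto)
      simp only [infer_hw_from_N_py, hnone, infer_hw_from_N_py_alt, if_pos h12, if_neg hc]
  · have hnone := no_match N (by tauto)
    simp only [infer_hw_from_N_py, hnone, infer_hw_from_N_py_alt, if_neg h12]
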